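-- pv_equiv track=rewrite | github.com/jmunuswa82/ABLE_AI | services/als_parser/parser.py | _infer_device_purpose
-- ===== SOURCE A (Python) =====
-- def _infer_device_purpose(tag: str, plugin_name: str) -> str:
--     tag_lower = tag.lower()
--     name_lower = plugin_name.lower()
--     combined = tag_lower + " " + name_lower
--
--     if any(k in combined for k in ["reverb", "hall", "room", "space"]):
--         return "reverb"
--     if any(k in combined for k in ["delay", "echo", "dub"]):
--         return "delay"
--     if any(k in combined for k in ["compressor", "compress", "limiter", "dynamics", "gate", "glue"]):
--         return "dynamics"
--     if any(k in combined for k in ["eq", "filter", "autofilter", "freq"]):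
--         return "eq_filter"
--     if any(k in combined for k in ["distort", "saturator", "overdrive", "chorus", "flanger", "modulation", "autopan"]):
--         return "modulation_distortion"
--     if any(k in combined for k in ["simpler", "sampler", "impulse", "instrument"]):
--         return "sampler_instrument"
--     if any(k in combined for k in ["operator", "wavetable", "drift", "meld", "synth"]):
--         return "synth"
--     if any(k in combined for k in ["drum", "beat"]):
--         return "drum_machine"
--     if any(k in combined for k in ["utility", "volume", "gain", "stereo"]):
--         return "utility"
--     if any(k in combined for k in ["midi", "arpeggio", "chord", "scale", "pitch"]):
--         return "midi_effect"
--     return "effect"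
-- ===== SOURCE B (Python) =====
-- # Flat keyword -> priority-rank map; the answer is the purpose with the minimal
-- # rank among all matched keywords (no ordered if-chain, no short-circuit).
-- KEYWORD_RANKS = {
--     "reverb": 0, "hall": 0, "room": 0, "space": 0,
--     "delay": 1, "echo": 1, "dub": 1,
--     "compressor": 2, "compress": 2, "limiter": 2, "dynamics": 2, "gate": 2, "glue": 2,
--     "eq": 3, "filter": 3, "autofilter": 3, "freq": 3,
--     "distort": 4, "saturator": 4, "overdrive": 4, "chorus": 4, "flanger": 4, "modulation": 4, "autopan": 4,
--     "simpler": 5, "sampler": 5, "impulse": 5, "instrument": 5,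
--     "operator": 6, "wavetable": 6, "drift": 6, "meld": 6, "synth": 6,
--     "drum": 7, "beat": 7,
--     "utility": 8, "volume": 8, "gain": 8, "stereo": 8,
--     "midi": 9, "arpeggio": 9, "chord": 9, "scale": 9, "pitch": 9,
-- }
--
-- PURPOSES = ["reverb", "delay", "dynamics", "eq_filter", "modulation_distortion",
--             "sampler_instrument", "synth", "drum_machine", "utility", "midi_effect",
--             "effect"]
--
--
-- def _infer_device_purpose(tag: str, plugin_name: str) -> str:
--     combined = tag.lower() + " " + plugin_name.lower()
--     best = min((rank for kw, rank in KEYWORD_RANKS.items() if kw in combined), default=10)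
--     return PURPOSES[best]
-- ===== Notes on version B (the rewrite author's own statement) =====
-- stated objective: alternative
-- what changed: Replaces the ordered short-circuit if-chain with a flat keyword-to-priority-rank dictionary: B takes the global minimum rank over all matched keywords and looks the purpose up in a rank-indexed table, instead of testing category predicates in sequence.
import Mathlib
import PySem

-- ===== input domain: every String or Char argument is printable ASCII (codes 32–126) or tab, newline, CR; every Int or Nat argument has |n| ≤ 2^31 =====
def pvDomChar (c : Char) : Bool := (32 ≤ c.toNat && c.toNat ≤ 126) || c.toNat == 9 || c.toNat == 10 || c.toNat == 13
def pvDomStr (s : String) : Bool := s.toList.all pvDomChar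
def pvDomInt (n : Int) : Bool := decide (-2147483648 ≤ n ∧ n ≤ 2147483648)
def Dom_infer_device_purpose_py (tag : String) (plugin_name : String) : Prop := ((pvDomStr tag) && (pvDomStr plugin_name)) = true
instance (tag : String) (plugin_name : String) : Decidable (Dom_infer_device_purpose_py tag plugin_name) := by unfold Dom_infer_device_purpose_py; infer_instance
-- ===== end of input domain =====

-- B replaces A's ordered short-circuit if-chain by a flat keyword→rank map, a global minimum over matched ranks, and a rank-indexed purpose table (objective: alternative).


-- ===== PORT A =====
def infer_device_purpose_py (tag : String) (plugin_name : String) : String :=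
  let tag_lower := PySem.Str.lower tag
  let name_lower := PySem.Str.lower plugin_name
  let combined := tag_lower ++ " " ++ name_lower
  if ["reverb", "hall", "room", "space"].any (fun k => PySem.Str.isIn k combined) then "reverb"
  else if ["delay", "echo", "dub"].any (fun k => PySem.Str.isIn k combined) then "delay"
  else if ["compressor", "compress", "limiter", "dynamics", "gate", "glue"].any (fun k => PySem.Str.isIn k combined) then "dynamics"
  else if ["eq", "filter", "autofilter", "freq"].any (fun k => PySem.Str.isIn k combined) then "eq_filter"
  else if ["distort", "saturator", "overdrive", "chorus", "flanger", "modulation", "autopan"].any (fun k => PySem.Str.isIn k combined) then "modulation_distortion"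
  else if ["simpler", "sampler", "impulse", "instrument"].any (fun k => PySem.Str.isIn k combined) then "sampler_instrument"
  else if ["operator", "wavetable", "drift", "meld", "synth"].any (fun k => PySem.Str.isIn k combined) then "synth"
  else if ["drum", "beat"].any (fun k => PySem.Str.isIn k combined) then "drum_machine"
  else if ["utility", "volume", "gain", "stereo"].any (fun k => PySem.Str.isIn k combined) then "utility"
  else if ["midi", "arpeggio", "chord", "scale", "pitch"].any (fun k => PySem.Str.isIn k combined) then "midi_effect"
  else "effect"

-- ===== PORT B =====
-- the KEYWORD_RANKS dict: a flat association list keyword → priority rank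
def pvKeywordRanks : List (String × Int) :=
  [("reverb", 0), ("hall", 0), ("room", 0), ("space", 0),
   ("delay", 1), ("echo", 1), ("dub", 1),
   ("compressor", 2), ("compress", 2), ("limiter", 2), ("dynamics", 2), ("gate", 2), ("glue", 2),
   ("eq", 3), ("filter", 3), ("autofilter", 3), ("freq", 3),
   ("distort", 4), ("saturator", 4), ("overdrive", 4), ("chorus", 4), ("flanger", 4), ("modulation", 4), ("autopan", 4),
   ("simpler", 5), ("sampler", 5), ("impulse", 5), ("instrument", 5),
   ("operator", 6), ("wavetable", 6), ("drift", 6), ("meld", 6), ("synth", 6),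
   ("drum", 7), ("beat", 7),
   ("utility", 8), ("volume", 8), ("gain", 8), ("stereo", 8),
   ("midi", 9), ("arpeggio", 9), ("chord", 9), ("scale", 9), ("pitch", 9)]

def pvPurposes : List String :=
  ["reverb", "delay", "dynamics", "eq_filter", "modulation_distortion",
   "sampler_instrument", "synth", "drum_machine", "utility", "midi_effect", "effect"]

def infer_device_purpose_py_alt (tag : String) (plugin_name : String) : String :=
  let combined := PySem.Str.lower tag ++ " " ++ PySem.Str.lower plugin_name
  -- min(generator of matched ranks, default=10)
  let best := PySem.List.minD
      ((pvKeywordRanks.filter (fun kr => PySem.Str.isIn kr.1 combined)).map Prod.snd)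
      (fun x => x) 10
  -- PURPOSES[best]: best is always in 0..10 and pvPurposes has 11 entries, so the
  -- pyGet? lookup is always some and the "" default is never used (exact port).
  (PySem.List.pyGet? pvPurposes best).getD ""

-- ===== PRECONDITION & SPEC =====
def Spec_infer_device_purpose_py (tag : String) (plugin_name : String) (out : String) : Prop := out = infer_device_purpose_py_alt tag plugin_name
instance (tag : String) (plugin_name : String) (out : String) : Decidable (Spec_infer_device_purpose_py tag plugin_name out) := by unfold Spec_infer_device_purpose_py; infer_instance

-- ===== CLAIM (what is proved, stated in full; the proofs are below) =====
def Claim_equal_infer_device_purpose_py : Prop := ∀ (tag : String) (plugin_name : String), Dom_infer_device_purpose_py tag plugin_name → Spec_infer_device_purpose_py tag plugin_name (infer_device_purpose_py tag plugin_name)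

-- ===== LEMMAS AND PROOFS =====

-- proof helpers: the ten keyword groups in priority order
def pvGroups : List (List String) :=
  [["reverb", "hall", "room", "space"],
   ["delay", "echo", "dub"],
   ["compressor", "compress", "limiter", "dynamics", "gate", "glue"],
   ["eq", "filter", "autofilter", "freq"],
   ["distort", "saturator", "overdrive", "chorus", "flanger", "modulation", "autopan"],
   ["simpler", "sampler", "impulse", "instrument"],
   ["operator", "wavetable", "drift", "meld", "synth"],
   ["drum", "beat"],
   ["utility", "volume", "gain", "stereo"],
   ["midi", "arpeggio", "chord", "scale", "pitch"]]

-- the flat ranked keyword list generated from groups starting at rank r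
def pvFlatR (r : Int) : List (List String) → List (String × Int)
  | [] => []
  | g :: gs => g.map (fun k => (k, r)) ++ pvFlatR (r + 1) gs

-- index of the first matching group (length of gs if none matches)
def pvFirstIdx (c : String) : List (List String) → Nat
  | [] => 0
  | g :: gs => if g.any (fun k => PySem.Str.isIn k c) then 0 else pvFirstIdx c gs + 1

lemma pvKR_eq : pvKeywordRanks = pvFlatR 0 pvGroups := by rfl

lemma pvFlatR_rank_le (gs : List (List String)) (r : Int) :
    ∀ p ∈ pvFlatR r gs, r ≤ p.2 := by
  induction gs generalizing r with
  | nil => simp [pvFlatR]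
  | cons g gs ih =>
    intro p hp
    simp only [pvFlatR, List.mem_append, List.mem_map] at hp
    rcases hp with ⟨k, _, rfl⟩ | hp
    · exact le_refl r
    · have := ih (r + 1) p hp
      omega

lemma pv_minD_getD (xs : List Int) (d : Int) :
    PySem.List.minD xs (fun x => x) d = (PySem.List.min? xs (fun x => x)).getD d := by
  cases xs <;> simp [PySem.List.minD, PySem.List.min?]

lemma pv_minD_eq_of (xs : List Int) (d a : Int) (ha : a ∈ xs)
    (hmin : ∀ y ∈ xs, a ≤ y) : PySem.List.minD xs (fun x => x) d = a := by
  rw [pv_minD_getD]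
  have hne : xs ≠ [] := by intro h; subst h; simp at ha
  rcases hm : PySem.List.min? xs (fun x => x) with _ | m
  · exact absurd ((PySem.List.min?_eq_none_iff xs _).mp hm) hne
  · have h1 : m ≤ a := PySem.List.min?_isMin hm a ha
    have h2 : a ≤ m := hmin m (PySem.List.min?_mem hm)
    simp [le_antisymm h1 h2]

lemma pv_minD_flat (c : String) (gs : List (List String)) (r : Int) :
    PySem.List.minD
        (((pvFlatR r gs).filter (fun kr => PySem.Str.isIn kr.1 c)).map Prod.snd)
        (fun x => x) (r + gs.length)
      = r + pvFirstIdx c gs := by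
  induction gs generalizing r with
  | nil => simp [pvFlatR, pvFirstIdx]
  | cons g gs ih =>
    simp only [pvFlatR, List.filter_append, List.map_append, pvFirstIdx]
    by_cases h : g.any (fun k => PySem.Str.isIn k c)
    · rw [if_pos h]
      obtain ⟨k, hk, hkc⟩ := List.any_eq_true.mp h
      have hcast : r + ((0 : Nat) : Int) = r := by simp
      rw [hcast]
      apply pv_minD_eq_of
      · apply List.mem_append_left
        simp only [List.mem_map, List.mem_filter, List.mem_map]
        exact ⟨(k, r), ⟨⟨k, hk, rfl⟩, hkc⟩, rfl⟩
      · intro y hy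
        rcases List.mem_append.mp hy with hy | hy
        · obtain ⟨p, hp, rfl⟩ := List.mem_map.mp hy
          obtain ⟨k', hk', rfl⟩ := List.mem_map.mp (List.mem_filter.mp hp).1
          simp
        · obtain ⟨p, hp, rfl⟩ := List.mem_map.mp hy
          have := pvFlatR_rank_le gs (r + 1) p (List.mem_filter.mp hp).1
          omega
    · rw [if_neg h]
      have hempty : (g.map (fun k => (k, r))).filter (fun kr => PySem.Str.isIn kr.1 c) = [] := by
        rw [List.filter_eq_nil_iff]
        intro p hp
        obtain ⟨k, hk, rfl⟩ := List.mem_map.mp hp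
        simp only [List.any_eq_true, not_exists, not_and] at h
        simpa using h k hk
      rw [hempty]
      simp only [List.map_nil, List.nil_append]
      have hlen : r + ((g :: gs).length : Int) = (r + 1) + (gs.length : Int) := by
        simp; omega
      rw [hlen, ih (r + 1)]
      push_cast
      ring

set_option maxHeartbeats 1000000 in
theorem pv_main (tag plugin_name : String) :
    infer_device_purpose_py tag plugin_name = infer_device_purpose_py_alt tag plugin_name := by
  simp only [infer_device_purpose_py, infer_device_purpose_py_alt]
  generalize (PySem.Str.lower tag ++ " " ++ PySem.Str.lower plugin_name) = c
  have h10 : (10 : Int) = (0 : Int) + (pvGroups.length : Int) := by simp [pvGroups]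
  rw [pvKR_eq, h10, pv_minD_flat c pvGroups 0, zero_add]
  rw [PySem.List.pyGet?_natCast]
  simp only [pvGroups, pvFirstIdx]
  split_ifs <;> rfl

-- ===== VERDICT (by name: the statement is the Claim_ definition above) =====
theorem infer_device_purpose_py_spec : Claim_equal_infer_device_purpose_py := by
  intro tag plugin_name _
  unfold Spec_infer_device_purpose_py
  exact pv_main tag plugin_name
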